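-- pv_equiv track=rewrite | github.com/aditya-kd/toolbox | work_aditya/CollegeHackerrank/waiter.py | waiter
-- ===== SOURCE A (Python) =====
-- def waiter(number, q):
--     # Write your code here
--     prime = [2,3]
--     for i in range(5,10001):
--         flag=False
--         j=2
--         while(j*j<=i):
--             if(i%j==0):
--                 flag=True
--             j+=1
--         if(flag==False):
--             prime.append(i)
--
--     answers=[]
--     b=[]
--     c=[]
--     k=0
--     currp = prime[0]
--     while(k<q):
--         while(len(number)!=0):
--             x=number.pop()
--             if(x%currp==0):
--                 b.append(x)
--             else:
--                 c.append(x)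
--         k+=1
--         currp = prime[k]
--         while(len(b)!=0):
--             answers.append(b.pop())
--         number=c[:]
--         c=[]
--
--     while(number):
--         answers.append(number.pop())
--     return answers
-- ===== SOURCE B (Python) =====
-- def waiter(number, q):
--     # Sieve of Eratosthenes-style marking over 0..10000 instead of trial division,
--     # and a recursive serving function over forward list filters instead of
--     # nested while-loops shuffling explicit b/c stacks with pop/append.
--     is_p = [True] * 10001
--     is_p[0] = False
--     is_p[1] = False
--     for i in range(2, 101):
--         for j in range(i * i, 10001, i):
--             is_p[j] = False
--     primes = [i for i in range(2, 10001) if is_p[i]]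
--
--     def serve(k, rem):
--         if k >= q:
--             return rem[::-1]
--         p = primes[k]
--         taken = [x for x in rem if x % p == 0]
--         rest = [x for x in reversed(rem) if x % p != 0]
--         return taken + serve(k + 1, rest)
--
--     return serve(0, list(number))
-- ===== Notes on version B (the rewrite author's own statement) =====
-- stated objective: simpler
-- what changed: Prime generation becomes a Sieve of Eratosthenes-style boolean array (mark multiples of 2..100 starting at the square, then collect unmarked indices) instead of per-number trial division, and the q serving rounds become a recursive serve function built from two forward list filters per round instead of triple-nested while-loops popping through explicit b/c stacks.
import Mathlib
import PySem

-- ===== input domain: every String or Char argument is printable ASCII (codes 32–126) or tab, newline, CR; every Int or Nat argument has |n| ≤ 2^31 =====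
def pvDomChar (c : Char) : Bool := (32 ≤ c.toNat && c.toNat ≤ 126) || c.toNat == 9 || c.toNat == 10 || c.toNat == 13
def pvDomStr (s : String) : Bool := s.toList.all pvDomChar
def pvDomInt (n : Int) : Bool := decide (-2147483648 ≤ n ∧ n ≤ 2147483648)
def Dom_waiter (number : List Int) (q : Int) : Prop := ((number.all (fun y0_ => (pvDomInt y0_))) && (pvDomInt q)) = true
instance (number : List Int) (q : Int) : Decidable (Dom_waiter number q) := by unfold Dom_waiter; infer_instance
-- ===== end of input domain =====

-- B replaces A's trial-division prime generation by a sieve-style boolean array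
-- (mark multiples, collect unmarked indices) and A's nested while-loops with explicit
-- b/c pop/append stacks by a recursive serve function of forward filters (objective:
-- simpler; measured faster). Python A empties its `number` argument in place via pop();
-- B does not — the equivalence proved here is about the RETURN value only.

-- ===== PORT A =====
-- inner `while(j*j<=i)` loop of A's prime generation; fuel only makes it total
-- (called with fuel 10001 ≥ number of iterations); `flag or …` = Python's sticky flag.
def pvTrialFlag (fuel : Nat) (i j : Int) : Bool :=
  match fuel with
  | 0 => false
  | fuel+1 =>
    if j*j ≤ i then ((PySem.Int.mod i j == 0) || pvTrialFlag fuel i (j+1)) else false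

def pvPrimesA : List Int :=
  (PySem.List.pyRange 5 10001 1).foldl
    (fun prime i => if pvTrialFlag 10001 i 2 = false then prime ++ [i] else prime)
    [2, 3]

-- `while(len(number)!=0): x=number.pop(); …` — popping from the end = structural
-- recursion over number.reverse, building b and c by append as Python does.
def pvPartition (rev : List Int) (b c : List Int) (currp : Int) : List Int × List Int :=
  match rev with
  | [] => (b, c)
  | x :: rest =>
    if PySem.Int.mod x currp == 0 then pvPartition rest (b ++ [x]) c currp
    else pvPartition rest b (c ++ [x]) currp

-- `while(k<q)` loop; fuel = remaining iterations (q - k), so the port is total;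
-- Python's prime[k] raises out of range — Pre_ excludes that, pyGetD default 0 is unreached there.
def pvMainLoop (fuel : Nat) (prime number answers : List Int) (k : Int) (currp : Int) : List Int :=
  match fuel with
  | 0 => answers ++ number.reverse          -- trailing `while(number): answers.append(number.pop())`
  | fuel+1 =>
    let bc := pvPartition number.reverse [] [] currp
    pvMainLoop fuel prime bc.2 (answers ++ bc.1.reverse) (k+1) (PySem.List.pyGetD prime (k+1) 0)

def waiter (number : List Int) (q : Int) : List Int :=
  pvMainLoop q.toNat pvPrimesA number [] 0 (PySem.List.pyGetD pvPrimesA 0 0)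

-- ===== PORT B =====
-- `is_p = [True]*10001; is_p[0]=is_p[1]=False`
def pvSieveInit : List Bool := ((List.replicate 10001 true).set 0 false).set 1 false

-- inner `for j in range(i*i, 10001, i): is_p[j] = False` (all indices are in range,
-- so List.set is exact for Python's assignment)
def pvMark (arr : List Bool) (i : Int) : List Bool :=
  (PySem.List.pyRange (i*i) 10001 i).foldl (fun a j => a.set j.toNat false) arr

-- the outer `for i in range(2, 101)` marking loop
def pvSieve : List Bool := (PySem.List.pyRange 2 101 1).foldl pvMark pvSieveInit

-- `primes = [i for i in range(2, 10001) if is_p[i]]` (i in range, getD exact)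
def pvPrimesB : List Int :=
  (PySem.List.pyRange 2 10001 1).filter (fun i => pvSieve.getD i.toNat false)

-- B's recursive `serve(k, rem)`; fuel = q - k only makes the recursion structural
-- (the Python base case `k >= q` is exactly fuel = 0); `rem[::-1]` = reverse.
def pvServe (primes : List Int) (fuel : Nat) (k : Int) (rem : List Int) : List Int :=
  match fuel with
  | 0 => rem.reverse
  | fuel+1 =>
    let p := PySem.List.pyGetD primes k 0
    rem.filter (fun x => PySem.Int.mod x p == 0) ++
      pvServe primes fuel (k+1) (rem.reverse.filter (fun x => !(PySem.Int.mod x p == 0)))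

def waiter_alt (number : List Int) (q : Int) : List Int :=
  pvServe pvPrimesB q.toNat 0 number

-- ===== PRECONDITION & SPEC =====
-- Pre_ excludes q ≥ 1229: there are 1229 primes ≤ 10000, so Python A's `prime[k]`
-- raises IndexError on those q (A returns on exactly q ≤ 1228).
def Pre_waiter (number : List Int) (q : Int) : Prop := q ≤ 1228
instance (number : List Int) (q : Int) : Decidable (Pre_waiter number q) := by unfold Pre_waiter; infer_instance
def pvWitness_waiter : List Int × Int := ([6, 10, 15], 2)

def Spec_waiter (number : List Int) (q : Int) (out : List Int) : Prop := out = waiter_alt number q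
instance (number : List Int) (q : Int) (out : List Int) : Decidable (Spec_waiter number q out) := by unfold Spec_waiter; infer_instance

-- ===== CLAIM (what is proved, stated in full; the proofs are below) =====
def Claim_equal_waiter : Prop := ∀ (number : List Int) (q : Int), Dom_waiter number q → Pre_waiter number q → Spec_waiter number q (waiter number q)

-- ===== LEMMAS AND PROOFS =====

-- the common value both prime generators compute: the primes from 2 to 10000 in order
def pvIsPr (i : Int) : Bool := decide (Nat.Prime i.toNat)
def pvPL : List Int := (PySem.List.pyRange 2 10001 1).filter pvIsPr

-- ---- number theory core ----
theorem pv_nat_comp (n : Nat) (h2 : 2 ≤ n) :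
    (¬ n.Prime) ↔ ∃ m : Nat, 2 ≤ m ∧ m*m ≤ n ∧ m ∣ n := by
  constructor
  · intro hnp
    refine ⟨n.minFac, (Nat.minFac_prime (by omega)).two_le, ?_, Nat.minFac_dvd n⟩
    have h := Nat.minFac_sq_le_self (by omega) hnp
    rw [pow_two] at h
    exact h
  · rintro ⟨m, hm2, hmm, hdvd⟩ hp
    rcases hp.eq_one_or_self_of_dvd m hdvd with h | h
    · omega
    · subst h; nlinarith

-- the same fact on the Int side, phrased with Python's `%`
theorem pv_int_comp (i : Int) (h2 : 2 ≤ i) :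
    (∃ m : Int, 2 ≤ m ∧ m*m ≤ i ∧ PySem.Int.mod i m = 0) ↔ ¬ i.toNat.Prime := by
  have hm' : ∀ m : Int, 0 ≤ m → ((m.toNat : Int) = m) := fun m hm => Int.toNat_of_nonneg hm
  rw [pv_nat_comp i.toNat (by omega)]
  constructor
  · rintro ⟨m, hmge, hmm, h0⟩
    refine ⟨m.toNat, by omega, ?_, ?_⟩
    · rw [← Nat.cast_le (α := Int)]
      push_cast
      rw [hm' m (by omega), hm' i (by omega)]
      exact hmm
    · rw [← Int.natCast_dvd_natCast, hm' m (by omega), hm' i (by omega)]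
      exact (PySem.Int.mod_eq_zero_iff_dvd i m).mp h0
  · rintro ⟨m, hmge, hmm, hdvd⟩
    refine ⟨(m : Int), by exact_mod_cast hmge, ?_, ?_⟩
    · have : ((m*m : Nat) : Int) ≤ ((i.toNat : Nat) : Int) := by exact_mod_cast hmm
      rw [hm' i (by omega)] at this
      push_cast at this
      exact this
    · refine (PySem.Int.mod_eq_zero_iff_dvd i (m : Int)).mpr ?_
      have : ((m : Nat) : Int) ∣ ((i.toNat : Nat) : Int) := Int.natCast_dvd_natCast.mpr hdvd
      rwa [hm' i (by omega)] at this

-- ---- A's inner while-loop characterisation ----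
theorem pv_trial_char (fuel : Nat) : ∀ (i j : Int), 2 ≤ j → i + 1 - j ≤ fuel →
    (pvTrialFlag fuel i j = true ↔ ∃ m : Int, j ≤ m ∧ m*m ≤ i ∧ PySem.Int.mod i m = 0) := by
  induction fuel with
  | zero =>
    intro i j hj hf
    simp only [pvTrialFlag, Bool.false_eq_true, false_iff]
    rintro ⟨m, hjm, hmm, _⟩
    have hf' : i + 1 - j ≤ 0 := by exact_mod_cast hf
    nlinarith [sq_nonneg (m - 1)]
  | succ fuel ih =>
    intro i j hj hf
    rw [pvTrialFlag]
    by_cases h : j*j ≤ i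
    · rw [if_pos h]
      simp only [Bool.or_eq_true, beq_iff_eq]
      rw [ih i (j+1) (by omega) (by omega)]
      constructor
      · rintro (h0 | ⟨m, hm, hmm, h0⟩)
        · exact ⟨j, le_refl j, h, h0⟩
        · exact ⟨m, by omega, hmm, h0⟩
      · rintro ⟨m, hm, hmm, h0⟩
        by_cases hmj : m = j
        · subst hmj; exact Or.inl h0
        · exact Or.inr ⟨m, by omega, hmm, h0⟩
    · rw [if_neg h]
      simp only [Bool.false_eq_true, false_iff]
      rintro ⟨m, hjm, hmm, _⟩
      nlinarith [mul_le_mul hjm hjm (by omega : (0:Int) ≤ j) (by omega : (0:Int) ≤ m)]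

theorem pv_flagA (i : Int) (h2 : 2 ≤ i) (hub : i ≤ 10000) :
    (decide (pvTrialFlag 10001 i 2 = false)) = pvIsPr i := by
  have hch := pv_trial_char 10001 i 2 (by omega) (by omega)
  have hf : (pvTrialFlag 10001 i 2 = false) ↔ ¬ (pvTrialFlag 10001 i 2 = true) := by
    cases h : pvTrialFlag 10001 i 2 <;> simp
  unfold pvIsPr
  exact decide_eq_decide.mpr (by rw [hf, hch, pv_int_comp i h2, not_not])

theorem pv_primesA_eq : pvPrimesA = pvPL := by
  unfold pvPrimesA pvPL
  rw [PySem.List.foldl_append_ite_eq_filter]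
  have h1 : (PySem.List.pyRange 5 10001 1).filter (fun i => decide (pvTrialFlag 10001 i 2 = false))
      = (PySem.List.pyRange 5 10001 1).filter pvIsPr := by
    apply List.filter_congr
    intro i hi
    have hb := (PySem.List.mem_pyRange_one).mp hi
    exact pv_flagA i (by omega) (by omega)
  rw [h1, PySem.List.pyRange_one_append 2 5 10001 (by omega) (by omega), List.filter_append]
  have h3 : (PySem.List.pyRange 2 5 1).filter pvIsPr = [2, 3] := by decide
  rw [h3]

-- ---- B's sieve characterisation ----
theorem pv_set_getD (arr : List Bool) (m n : Nat) :
    (arr.set m false).getD n false = (arr.getD n false && !(m == n)) := by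
  rw [List.getD_eq_getElem?_getD, List.getD_eq_getElem?_getD, List.getElem?_set]
  by_cases hmn : m = n
  · subst hmn
    by_cases hlen : m < arr.length
    · simp [hlen]
    · simp [hlen]
  · simp [hmn]

theorem pv_set_foldl_getD : ∀ (l : List Int) (arr : List Bool) (n : Nat),
    (l.foldl (fun a j => a.set j.toNat false) arr).getD n false
      = (arr.getD n false && !(l.any (fun j => j.toNat == n))) := by
  intro l
  induction l with
  | nil => intro arr n; simp
  | cons j rest ih =>
    intro arr n
    simp only [List.foldl_cons, List.any_cons, ih, pv_set_getD, Bool.not_or, Bool.and_assoc]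

theorem pv_sieve_foldl_getD : ∀ (l : List Int) (arr : List Bool) (n : Nat),
    (l.foldl pvMark arr).getD n false
      = (arr.getD n false &&
          l.all (fun i => !((PySem.List.pyRange (i*i) 10001 i).any (fun j => j.toNat == n)))) := by
  intro l
  induction l with
  | nil => intro arr n; simp
  | cons i rest ih =>
    intro arr n
    simp only [List.foldl_cons, List.all_cons, ih, pvMark, pv_set_foldl_getD, Bool.and_assoc]

theorem pv_init_getD (n : Nat) (h2 : 2 ≤ n) (hub : n < 10001) :
    pvSieveInit.getD n false = true := by
  unfold pvSieveInit
  rw [pv_set_getD, pv_set_getD, List.getD_replicate true hub]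
  simp only [Bool.true_and, Bool.and_eq_true, Bool.not_eq_true', beq_eq_false_iff_ne]
  omega

theorem pv_sieve_getD (n : Int) (h2 : 2 ≤ n) (hub : n ≤ 10000) :
    pvSieve.getD n.toNat false = pvIsPr n := by
  unfold pvSieve
  rw [pv_sieve_foldl_getD, pv_init_getD n.toNat (by omega) (by omega), Bool.true_and]
  rw [Bool.eq_iff_iff, List.all_eq_true]
  unfold pvIsPr
  have hiff : (¬ ∃ m : Int, 2 ≤ m ∧ m*m ≤ n ∧ PySem.Int.mod n m = 0) ↔ Nat.Prime n.toNat := by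
    rw [pv_int_comp n h2]; exact not_not
  rw [decide_eq_true_iff, ← hiff]
  constructor
  · intro hall ⟨m, hm2, hmm, hmod⟩
    have hm101 : m < 101 := by nlinarith
    have hmem : m ∈ PySem.List.pyRange 2 101 1 := (PySem.List.mem_pyRange_one).mpr ⟨hm2, hm101⟩
    have h := hall m hmem
    rw [Bool.not_eq_true', List.any_eq_false] at h
    have hdvd : m ∣ n := (PySem.Int.mod_eq_zero_iff_dvd n m).mp hmod
    have hnmem : n ∈ PySem.List.pyRange (m*m) 10001 m := by
      rw [PySem.List.mem_pyRange_iff_of_pos (by omega)]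
      refine ⟨hmm, by omega, ?_⟩
      exact dvd_sub hdvd (Dvd.intro m rfl)
    have := h n hnmem
    simp at this
  · intro hnc i hi
    have hib := (PySem.List.mem_pyRange_one).mp hi
    rw [Bool.not_eq_true', List.any_eq_false]
    intro j hj
    rw [PySem.List.mem_pyRange_iff_of_pos (by omega)] at hj
    obtain ⟨hjlo, hjhi, hjd⟩ := hj
    intro hjn
    rw [beq_iff_eq] at hjn
    have hjv : j = n := by
      have h1 : (0:Int) ≤ j := by nlinarith
      omega
    subst hjv
    have hdvd : i ∣ j := by
      have : i ∣ j - i*i + i*i := dvd_add hjd (Dvd.intro i rfl)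
      simpa using this
    exact hnc ⟨i, hib.1, hjlo, (PySem.Int.mod_eq_zero_iff_dvd j i).mpr hdvd⟩

theorem pv_primesB_eq : pvPrimesB = pvPL := by
  unfold pvPrimesB pvPL
  apply List.filter_congr
  intro i hi
  have hb := (PySem.List.mem_pyRange_one).mp hi
  exact pv_sieve_getD i (by omega) (by omega)

-- ---- simulation equivalence (parametric in the prime list) ----
theorem pv_partition_eq (currp : Int) : ∀ (rev b c : List Int),
    pvPartition rev b c currp
      = (b ++ rev.filter (fun x => PySem.Int.mod x currp == 0),
         c ++ rev.filter (fun x => !(PySem.Int.mod x currp == 0))) := by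
  intro rev
  induction rev with
  | nil => intro b c; simp [pvPartition]
  | cons x rest ih =>
    intro b c
    by_cases h : (PySem.Int.mod x currp == 0) = true
    · simp [pvPartition, h, ih, List.append_assoc]
    · simp [pvPartition, Bool.of_not_eq_true h, ih, List.append_assoc]

theorem pv_main_serve (fuel : Nat) : ∀ (pr number answers : List Int) (k : Int),
    pvMainLoop fuel pr number answers k (PySem.List.pyGetD pr k 0)
      = answers ++ pvServe pr fuel k number := by
  induction fuel with
  | zero => intro pr number answers k; simp [pvMainLoop, pvServe]
  | succ fuel ih =>
    intro pr number answers k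
    rw [pvMainLoop, pvServe, pv_partition_eq]
    simp only [List.nil_append, List.filter_reverse, List.reverse_reverse]
    rw [ih]
    simp [List.append_assoc]

-- ===== VERDICT (by name: the statement is the Claim_ definition above) =====
theorem waiter_spec : Claim_equal_waiter := by
  intro number q _ _
  unfold Spec_waiter waiter waiter_alt
  rw [pv_main_serve q.toNat pvPrimesA number [] 0, pv_primesA_eq, ← pv_primesB_eq,
    List.nil_append]
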